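-- pv_equiv track=rewrite | github.com/Pranathi1184/Retail-AI-Inventory-System | BACKEND/TEST.py | calculate_stockout_risk
-- ===== SOURCE A (Python) =====
-- def calculate_stockout_risk(current_inventory, daily_forecasts):
--     """Calculate probability of stockout"""
--     cumulative_demand = 0
--     stockout_day = None
--
--     for day, demand in daily_forecasts.items():
--         cumulative_demand += demand
--         if cumulative_demand > current_inventory and stockout_day is None:
--             stockout_day = day
--
--     if stockout_day:
--         return f"High risk - Stockout expected around {stockout_day}"
--     else:
--         return "Low risk - Sufficient inventory for 30+ days"
-- ===== SOURCE B (Python) =====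
-- def calculate_stockout_risk(current_inventory, daily_forecasts):
--     """Calculate probability of stockout"""
--     cums = []
--     total = 0
--     for demand in daily_forecasts.values():
--         total += demand
--         cums.append(total)
--     stockout_day = next(
--         (day for day, cum in zip(daily_forecasts, cums) if cum > current_inventory),
--         None,
--     )
--     if stockout_day:
--         return f"High risk - Stockout expected around {stockout_day}"
--     else:
--         return "Low risk - Sufficient inventory for 30+ days"
-- ===== Notes on version B (the rewrite author's own statement) =====
-- stated objective: alternative
-- what changed: Replaced the interleaved accumulate-and-guard loop carrying a stockout_day sentinel by a build-then-search decomposition: first materialise the cumulative-demand table, then find the first day whose cumulative demand exceeds inventory with next() over the zipped days.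
import Mathlib
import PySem

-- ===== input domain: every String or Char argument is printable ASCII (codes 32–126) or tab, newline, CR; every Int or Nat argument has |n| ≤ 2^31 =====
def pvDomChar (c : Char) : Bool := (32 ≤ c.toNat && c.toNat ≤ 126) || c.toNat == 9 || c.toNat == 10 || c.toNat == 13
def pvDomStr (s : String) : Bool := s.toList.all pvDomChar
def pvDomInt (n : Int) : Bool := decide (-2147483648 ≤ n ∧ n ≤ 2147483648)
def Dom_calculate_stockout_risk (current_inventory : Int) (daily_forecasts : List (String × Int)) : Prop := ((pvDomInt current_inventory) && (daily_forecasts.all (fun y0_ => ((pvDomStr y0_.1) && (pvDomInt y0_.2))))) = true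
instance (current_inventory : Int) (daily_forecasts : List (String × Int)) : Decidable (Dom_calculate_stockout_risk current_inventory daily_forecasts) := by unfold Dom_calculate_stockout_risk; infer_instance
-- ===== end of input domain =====

-- B replaces A's single accumulate-and-guard loop (carrying a stockout_day sentinel)
-- by a build-then-search decomposition: build the cumulative-demand table, then find
-- the first day whose cumulative demand exceeds inventory. Objective: alternative.

-- ===== PORT A =====
-- the for-loop of A, carrying (cumulative_demand, stockout_day)
def pvLoopA (current_inventory : Int) (cum : Int) (so : Option String) :
    List (String × Int) → Option String
  | [] => so
  | (day, demand) :: rest =>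
      let cum' := cum + demand
      let so' := if cum' > current_inventory ∧ so = none then some day else so
      pvLoopA current_inventory cum' so' rest

def calculate_stockout_risk (current_inventory : Int) (daily_forecasts : List (String × Int)) : String :=
  match pvLoopA current_inventory 0 none daily_forecasts with
  | some day => if day ≠ "" then "High risk - Stockout expected around " ++ day
                else "Low risk - Sufficient inventory for 30+ days"
  | none => "Low risk - Sufficient inventory for 30+ days"

-- ===== PORT B =====
-- running-total table of B's first loop (cums.append(total))
def pvCums (total : Int) : List Int → List Int
  | [] => []
  | d :: rest => (total + d) :: pvCums (total + d) rest

def calculate_stockout_risk_alt (current_inventory : Int) (daily_forecasts : List (String × Int)) : String :=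
  let cums := pvCums 0 (daily_forecasts.map Prod.snd)
  let stockout_day :=
    (((daily_forecasts.map Prod.fst).zip cums).find? (fun p => p.2 > current_inventory)).map Prod.fst
  match stockout_day with
  | some day => if day ≠ "" then "High risk - Stockout expected around " ++ day
                else "Low risk - Sufficient inventory for 30+ days"
  | none => "Low risk - Sufficient inventory for 30+ days"

-- ===== PRECONDITION & SPEC =====
-- Pre_ excludes lists with duplicate day keys: a Python dict cannot carry them (later
-- occurrences overwrite earlier ones on construction), so no dict input corresponds to such a list.
def Pre_calculate_stockout_risk (current_inventory : Int) (daily_forecasts : List (String × Int)) : Prop :=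
  (daily_forecasts.map Prod.fst).Nodup
instance (current_inventory : Int) (daily_forecasts : List (String × Int)) : Decidable (Pre_calculate_stockout_risk current_inventory daily_forecasts) := by unfold Pre_calculate_stockout_risk; infer_instance

def pvWitness_calculate_stockout_risk : Int × (List (String × Int)) := (3, [("Mon", 2), ("Tue", 2)])

def Spec_calculate_stockout_risk (current_inventory : Int) (daily_forecasts : List (String × Int)) (out : String) : Prop := out = calculate_stockout_risk_alt current_inventory daily_forecasts
instance (current_inventory : Int) (daily_forecasts : List (String × Int)) (out : String) : Decidable (Spec_calculate_stockout_risk current_inventory daily_forecasts out) := by unfold Spec_calculate_stockout_risk; infer_instance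

-- ===== CLAIM (what is proved, stated in full; the proofs are below) =====
def Claim_equal_calculate_stockout_risk : Prop := ∀ (current_inventory : Int) (daily_forecasts : List (String × Int)), Dom_calculate_stockout_risk current_inventory daily_forecasts → Pre_calculate_stockout_risk current_inventory daily_forecasts → Spec_calculate_stockout_risk current_inventory daily_forecasts (calculate_stockout_risk current_inventory daily_forecasts)

-- ===== LEMMAS AND PROOFS =====

theorem pvLoopA_some (ci : Int) (d : String) :
    ∀ (l : List (String × Int)) (cum : Int), pvLoopA ci cum (some d) l = some d := by
  intro l
  induction l with
  | nil => intro cum; rfl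
  | cons p rest ih =>
      intro cum
      obtain ⟨day, demand⟩ := p
      simp [pvLoopA, ih]

theorem pvLoopA_eq_find (ci : Int) :
    ∀ (l : List (String × Int)) (cum : Int),
      pvLoopA ci cum none l =
        ((((l.map Prod.fst).zip (pvCums cum (l.map Prod.snd))).find?
            (fun p => p.2 > ci)).map Prod.fst) := by
  intro l
  induction l with
  | nil => intro cum; rfl
  | cons p rest ih =>
      intro cum
      obtain ⟨day, demand⟩ := p
      by_cases h : cum + demand > ci
      · simp [pvLoopA, pvCums, h, pvLoopA_some]
      · simp [pvLoopA, pvCums, h, ih]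

-- ===== VERDICT (by name: the statement is the Claim_ definition above) =====
theorem calculate_stockout_risk_spec : Claim_equal_calculate_stockout_risk := by
  intro ci dfs _ _
  unfold Spec_calculate_stockout_risk calculate_stockout_risk calculate_stockout_risk_alt
  rw [pvLoopA_eq_find]
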